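-- pv_equiv track=rewrite | github.com/lucasdellasala/tp-grupal-aed1-ip-uba | validacionesMARCO.py | son_matriz_y_misma_dimension
-- ===== SOURCE A (Python) =====
-- from typing import Any
--
-- def es_matriz(matriz:list[list[Any]])-> bool:
--     res:bool = True
--     for filas in matriz:
--         res = res and len(filas) == len(matriz[0])
--     return res
--
-- def son_matriz_y_misma_dimension(tablero: list[list[int]], tablero_visible: list[list[int]])->bool:
--     # Verifica si son matrices válidas
--     if not (es_matriz(tablero) and es_matriz(tablero_visible)):
--         return False
--     # verifica que tienen el mismo número de filas
--     if len(tablero) != len(tablero_visible):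
--         return False
--     # Verfica que cada fila tiene el mimo número de filas
--     res:bool = True
--     for i in range(len(tablero)):
--         res = res and len(tablero[i]) == len(tablero_visible[i])
--     return res
-- ===== SOURCE B (Python) =====
-- def son_matriz_y_misma_dimension(tablero: list[list[int]], tablero_visible: list[list[int]]) -> bool:
--     if len(tablero) != len(tablero_visible):
--         return False
--     return len({len(f) for f in tablero + tablero_visible}) <= 1
-- ===== Notes on version B (the rewrite author's own statement) =====
-- stated objective: simpler
-- what changed: Replaces the es_matriz helper, the two AND-accumulator loops and the per-index row-comparison loop by one row-count check plus a single set of all row lengths from both matrices, returning whether it has at most one distinct value.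
import Mathlib
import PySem

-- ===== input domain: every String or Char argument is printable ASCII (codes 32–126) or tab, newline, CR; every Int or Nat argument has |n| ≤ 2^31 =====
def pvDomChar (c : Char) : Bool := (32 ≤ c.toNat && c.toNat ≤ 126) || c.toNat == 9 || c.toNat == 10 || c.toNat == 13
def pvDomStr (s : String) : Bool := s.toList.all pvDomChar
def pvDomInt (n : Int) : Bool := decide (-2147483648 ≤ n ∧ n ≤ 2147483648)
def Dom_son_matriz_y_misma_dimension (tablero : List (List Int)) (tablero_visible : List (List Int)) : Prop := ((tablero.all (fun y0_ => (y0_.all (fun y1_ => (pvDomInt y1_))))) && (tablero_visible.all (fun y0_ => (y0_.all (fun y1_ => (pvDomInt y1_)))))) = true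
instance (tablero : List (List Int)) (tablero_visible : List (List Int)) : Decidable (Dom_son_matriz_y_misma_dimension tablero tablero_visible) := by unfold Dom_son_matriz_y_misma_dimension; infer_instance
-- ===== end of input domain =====

-- B is a simpler re-implementation: one row-count check plus a single set of all row lengths
-- (at most one distinct value), replacing A's es_matriz helper and two accumulator loops.

-- ===== PORT A =====
-- es_matriz: AND-accumulator over the rows; 'len(matriz[0])' is only evaluated inside the loop,
-- where matriz is nonempty, so 'matriz.headD []' is exact there.
def es_matriz (matriz : List (List Int)) : Bool :=
  matriz.foldl (fun res filas => res && (filas.length == (matriz.headD []).length)) true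

def son_matriz_y_misma_dimension (tablero : List (List Int)) (tablero_visible : List (List Int)) : Bool :=
  if !(es_matriz tablero && es_matriz tablero_visible) then false
  else if tablero.length != tablero_visible.length then false
  else
    -- for i in range(len(tablero)): res = res and len(tablero[i]) == len(tablero_visible[i])
    -- indices are in range for both lists (equal lengths checked above), so getD is exact
    (List.range tablero.length).foldl
      (fun res i => res && ((tablero.getD i []).length == (tablero_visible.getD i []).length)) true

-- ===== PORT B =====
def son_matriz_y_misma_dimension_alt (tablero : List (List Int)) (tablero_visible : List (List Int)) : Bool :=
  if tablero.length != tablero_visible.length then false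
  else decide ((PySem.Set.ofList ((tablero ++ tablero_visible).map List.length)).length ≤ 1)

-- ===== PRECONDITION & SPEC =====
def Spec_son_matriz_y_misma_dimension (tablero : List (List Int)) (tablero_visible : List (List Int)) (out : Bool) : Prop := out = son_matriz_y_misma_dimension_alt tablero tablero_visible
instance (tablero : List (List Int)) (tablero_visible : List (List Int)) (out : Bool) : Decidable (Spec_son_matriz_y_misma_dimension tablero tablero_visible out) := by unfold Spec_son_matriz_y_misma_dimension; infer_instance

-- ===== CLAIM (what is proved, stated in full; the proofs are below) =====
def Claim_equal_son_matriz_y_misma_dimension : Prop := ∀ (tablero : List (List Int)) (tablero_visible : List (List Int)), Dom_son_matriz_y_misma_dimension tablero tablero_visible → Spec_son_matriz_y_misma_dimension tablero tablero_visible (son_matriz_y_misma_dimension tablero tablero_visible)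

-- ===== LEMMAS AND PROOFS =====

-- the AND-accumulator loop is List.all
theorem foldl_and_eq_all {a : Type} (l : List a) (p : a → Bool) (b : Bool) :
    l.foldl (fun r x => r && p x) b = (b && l.all p) := by
  induction l generalizing b with
  | nil => simp
  | cons x xs ih => simp [List.foldl_cons, ih, Bool.and_assoc]

-- set(xs) has at most one element iff all elements of xs are equal
theorem setLen_le_one_iff {a : Type} [BEq a] [LawfulBEq a] (xs : List a) :
    (PySem.Set.ofList xs).length ≤ 1 ↔ ∀ c ∈ xs, ∀ d ∈ xs, c = d := by
  constructor
  . intro h c hc d hd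
    have hc' : c ∈ PySem.Set.ofList xs := by simpa [PySem.Set.mem_ofList] using hc
    have hd' : d ∈ PySem.Set.ofList xs := by simpa [PySem.Set.mem_ofList] using hd
    match hs : PySem.Set.ofList xs with
    | [] => rw [hs] at hc'; simp at hc'
    | [e] => rw [hs] at hc' hd'; simp at hc' hd'; rw [hc', hd']
    | e :: e' :: rest => rw [hs] at h; simp at h
  . intro h
    by_contra hlen
    rw [not_le] at hlen
    match hs : PySem.Set.ofList xs with
    | [] => rw [hs] at hlen; simp at hlen
    | [e] => rw [hs] at hlen; simp at hlen
    | e :: e' :: rest =>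
      have hnd : (PySem.Set.ofList xs).Nodup := PySem.Set.nodup_ofList xs
      rw [hs] at hnd
      have hee : e ≠ e' := by
        intro hEq; exact (List.nodup_cons.mp hnd).1 (hEq ▸ List.mem_cons_self ..)
      have he : e ∈ xs := by
        have : e ∈ PySem.Set.ofList xs := hs ▸ List.mem_cons_self ..
        simpa [PySem.Set.mem_ofList] using this
      have he' : e' ∈ xs := by
        have : e' ∈ PySem.Set.ofList xs := hs ▸ List.mem_cons_of_mem _ (List.mem_cons_self ..)
        simpa [PySem.Set.mem_ofList] using this
      exact hee (h e he e' he')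

theorem es_matriz_iff (m : List (List Int)) :
    es_matriz m = true ↔ ∀ r ∈ m, r.length = (m.headD []).length := by
  simp [es_matriz, foldl_and_eq_all, List.all_eq_true]

theorem A_true_iff (t v : List (List Int)) :
    son_matriz_y_misma_dimension t v = true ↔
      (es_matriz t = true ∧ es_matriz v = true ∧ t.length = v.length ∧
       ∀ i ∈ List.range t.length, (t.getD i []).length = (v.getD i []).length) := by
  unfold son_matriz_y_misma_dimension
  rw [foldl_and_eq_all]
  by_cases h1 : (es_matriz t && es_matriz v) = true
  . simp only [h1, Bool.not_true, Bool.false_eq_true, if_false]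
    by_cases h2 : t.length = v.length
    . simp [h2, List.all_eq_true]
      simp at h1
      tauto
    . have : (t.length != v.length) = true := by simpa using h2
      simp [this]
      tauto
  . simp at h1 ⊢
    tauto

theorem B_true_iff (t v : List (List Int)) :
    son_matriz_y_misma_dimension_alt t v = true ↔
      (t.length = v.length ∧
       ∀ c ∈ (t ++ v).map List.length, ∀ d ∈ (t ++ v).map List.length, c = d) := by
  unfold son_matriz_y_misma_dimension_alt
  by_cases h : t.length = v.length
  . have : (t.length != v.length) = false := by simpa using h
    simp [this, setLen_le_one_iff]
    tauto
  . have : (t.length != v.length) = true := by simpa using h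
    simp [this]
    tauto

theorem getD_mem_of_lt (t : List (List Int)) (i : Nat) (h : i < t.length) :
    t.getD i [] ∈ t := by
  rw [List.getD_eq_getElem _ _ h]
  exact List.getElem_mem h

theorem headD_mem (t : List (List Int)) (h : t ≠ []) : t.headD [] ∈ t := by
  cases t with
  | nil => exact absurd rfl h
  | cons x l => simp

theorem headD_eq_getD_zero (t : List (List Int)) (h : t ≠ []) : t.headD [] = t.getD 0 [] := by
  cases t with
  | nil => exact absurd rfl h
  | cons x l => simp

-- ===== VERDICT (by name: the statement is the Claim_ definition above) =====
theorem son_matriz_y_misma_dimension_spec : Claim_equal_son_matriz_y_misma_dimension := by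
  intro t v _
  unfold Spec_son_matriz_y_misma_dimension
  rw [Bool.eq_iff_iff, A_true_iff, B_true_iff]
  constructor
  . rintro ⟨ht, hv, hlen, hidx⟩
    refine ⟨hlen, ?_⟩
    have htall := (es_matriz_iff t).mp ht
    have hvall := (es_matriz_iff v).mp hv
    intro c hc d hd
    by_cases hte : t = []
    . subst hte
      have hve : v = [] := List.eq_nil_of_length_eq_zero hlen.symm
      subst hve; simp at hc
    . have hve : v ≠ [] := by
        intro h0; rw [h0] at hlen; simp at hlen; exact hte hlen
      have h0lt : 0 < t.length := List.length_pos_iff.mpr hte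
      have h00 := hidx 0 (List.mem_range.mpr h0lt)
      have hheads : (t.headD []).length = (v.headD []).length := by
        rw [headD_eq_getD_zero t hte, headD_eq_getD_zero v hve]; exact h00
      have key : ∀ x ∈ (t ++ v).map List.length, x = (t.headD []).length := by
        intro x hx
        simp only [List.map_append, List.mem_append, List.mem_map] at hx
        rcases hx with ⟨r, hr, hxr⟩ | ⟨r, hr, hxr⟩
        . exact hxr ▸ htall r hr
        . rw [← hxr, hvall r hr, ← hheads]
      rw [key c hc, key d hd]
  . rintro ⟨hlen, hall⟩
    have hmemlen : ∀ (m : List (List Int)), m = t ∨ m = v ->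
        ∀ r ∈ m, r.length ∈ (t ++ v).map List.length := by
      rintro m hm r hr
      simp only [List.map_append, List.mem_append, List.mem_map]
      rcases hm with hm | hm
      . exact Or.inl ⟨r, hm ▸ hr, rfl⟩
      . exact Or.inr ⟨r, hm ▸ hr, rfl⟩
    refine ⟨?_, ?_, hlen, ?_⟩
    . rw [es_matriz_iff]
      intro r hr
      have hte : t ≠ [] := List.ne_nil_of_mem hr
      exact hall _ (hmemlen t (Or.inl rfl) r hr) _
        (hmemlen t (Or.inl rfl) _ (headD_mem t hte))
    . rw [es_matriz_iff]
      intro r hr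
      have hve : v ≠ [] := List.ne_nil_of_mem hr
      exact hall _ (hmemlen v (Or.inr rfl) r hr) _
        (hmemlen v (Or.inr rfl) _ (headD_mem v hve))
    . intro i hi
      have hi' := List.mem_range.mp hi
      exact hall _ (hmemlen t (Or.inl rfl) _ (getD_mem_of_lt t i hi')) _
        (hmemlen v (Or.inr rfl) _ (getD_mem_of_lt v i (hlen ▸ hi')))
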